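-- pv_equiv track=rewrite | github.com/mattbierbaum/arxiv-public-datasets | arxiv_public_data/authors.py | _remove_double_commas
-- ===== SOURCE A (Python) =====
-- from typing import Dict, Iterator, List, Tuple
--
-- def _remove_double_commas(items: List[str]) -> List[str]:
--
--     parts: List[str] = []
--     last = ''
--     for pt in items:
--         if pt == ',' and last == ',':
--             continue
--         else:
--             parts.append(pt)
--             last = pt
--     return parts
-- ===== SOURCE B (Python) =====
-- from itertools import groupby
-- from typing import List
--
-- def _remove_double_commas(items: List[str]) -> List[str]:
--     out: List[str] = []
--     for key, group in groupby(items):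
--         if key == ',':
--             out.append(',')
--         else:
--             out.extend(group)
--     return out
-- ===== Notes on version B (the rewrite author's own statement) =====
-- stated objective: idiomatic
-- what changed: B splits the list into maximal runs of adjacent-equal tokens with itertools.groupby and emits one ',' per comma run, instead of a flat scan tracking the previous token in a 'last' variable.
import Mathlib
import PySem

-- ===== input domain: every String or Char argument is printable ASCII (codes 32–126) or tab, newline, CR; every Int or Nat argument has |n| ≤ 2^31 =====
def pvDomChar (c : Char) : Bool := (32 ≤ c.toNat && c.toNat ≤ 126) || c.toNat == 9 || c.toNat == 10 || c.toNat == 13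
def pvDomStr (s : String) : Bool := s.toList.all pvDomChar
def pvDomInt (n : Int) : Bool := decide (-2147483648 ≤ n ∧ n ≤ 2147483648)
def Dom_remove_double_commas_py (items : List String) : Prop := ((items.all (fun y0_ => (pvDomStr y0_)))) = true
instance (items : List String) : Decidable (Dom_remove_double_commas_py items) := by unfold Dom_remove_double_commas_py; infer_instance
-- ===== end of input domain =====

-- B collapses runs of adjacent equal tokens via grouping (itertools.groupby style) instead of A's flat scan with a 'last' variable; objective: idiomatic.

-- ===== PORT A =====
-- A's loop: accumulate `parts`, tracking `last`; skip a ',' when the previous kept token was ','.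
def removeDC_A_loop : List String → String → List String → List String
  | [], _, parts => parts
  | pt :: rest, last, parts =>
    if pt = "," ∧ last = "," then removeDC_A_loop rest last parts
    else removeDC_A_loop rest pt (parts ++ [pt])

def remove_double_commas_py (items : List String) : List String :=
  removeDC_A_loop items "" []

-- ===== PORT B =====
-- groupby(items): maximal runs of adjacent equal elements, as (key, group) pairs.
def removeDC_runs : List String → List (String × List String)
  | [] => []
  | x :: xs =>
    match removeDC_runs xs with
    | (k, g) :: rest => if x = k then (k, x :: g) :: rest else (x, [x]) :: (k, g) :: rest
    | [] => [(x, [x])]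

def remove_double_commas_py_alt (items : List String) : List String :=
  (removeDC_runs items).foldl
    (fun out kg => if kg.1 = "," then out ++ [","] else out ++ kg.2) []

-- ===== PRECONDITION & SPEC =====
def Spec_remove_double_commas_py (items : List String) (out : List String) : Prop := out = remove_double_commas_py_alt items
instance (items : List String) (out : List String) : Decidable (Spec_remove_double_commas_py items out) := by unfold Spec_remove_double_commas_py; infer_instance

-- ===== CLAIM (what is proved, stated in full; the proofs are below) =====
def Claim_equal_remove_double_commas_py : Prop := ∀ (items : List String), Dom_remove_double_commas_py items → Spec_remove_double_commas_py items (remove_double_commas_py items)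

-- ===== LEMMAS AND PROOFS =====

-- accumulator-free form of A's loop
def removeDC_collapse : List String → String → List String
  | [], _ => []
  | x :: xs, last =>
    if x = "," ∧ last = "," then removeDC_collapse xs last
    else x :: removeDC_collapse xs x

theorem removeDC_A_loop_eq (xs : List String) :
    ∀ (last : String) (parts : List String),
      removeDC_A_loop xs last parts = parts ++ removeDC_collapse xs last := by
  induction xs with
  | nil => intro last parts; simp [removeDC_A_loop, removeDC_collapse]
  | cons x xs ih =>
    intro last parts
    by_cases h : x = "," ∧ last = ","
    · simp [removeDC_A_loop, removeDC_collapse, h, ih]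
    · simp [removeDC_A_loop, removeDC_collapse, h, ih]

-- flatMap form of B's fold
def removeDC_f (kg : String × List String) : List String :=
  if kg.1 = "," then [","] else kg.2

theorem removeDC_foldl_eq (rs : List (String × List String)) :
    ∀ (acc : List String),
      rs.foldl (fun out kg => if kg.1 = "," then out ++ [","] else out ++ kg.2) acc
        = acc ++ rs.flatMap removeDC_f := by
  induction rs with
  | nil => intro acc; simp
  | cons r rs ih =>
    intro acc
    by_cases h : r.1 = ","
    · simp [List.foldl, h, ih, removeDC_f, List.flatMap_cons]
    · simp [List.foldl, h, ih, removeDC_f, List.flatMap_cons]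

def removeDC_F (xs : List String) : List String :=
  (removeDC_runs xs).flatMap removeDC_f

-- one-step unfolding of removeDC_runs
theorem removeDC_runs_cons (x : String) (xs : List String) :
    removeDC_runs (x :: xs) =
      match removeDC_runs xs with
      | (k, g) :: rest => if x = k then (k, x :: g) :: rest else (x, [x]) :: (k, g) :: rest
      | [] => [(x, [x])] := rfl

-- head key of the runs of a nonempty list is its head element
theorem removeDC_runs_head (x : String) (xs : List String) :
    ∃ g rest, removeDC_runs (x :: xs) = (x, g) :: rest := by
  rw [removeDC_runs_cons]
  cases h : removeDC_runs xs with
  | nil => exact ⟨[x], [], by simp⟩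
  | cons kg rest =>
    obtain ⟨k, g⟩ := kg
    by_cases hx : x = k
    · exact ⟨x :: g, rest, by simp [hx]⟩
    · exact ⟨[x], (k, g) :: rest, by simp [hx]⟩

theorem removeDC_F_cons_ne (x : String) (xs : List String) (hx : x ≠ ",") :
    removeDC_F (x :: xs) = x :: removeDC_F xs := by
  cases xs with
  | nil => simp [removeDC_F, removeDC_runs, removeDC_f, hx]
  | cons y ys =>
    obtain ⟨g, rest, hr⟩ := removeDC_runs_head y ys
    unfold removeDC_F
    rw [removeDC_runs_cons x (y :: ys), hr]
    by_cases hxy : x = y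
    · subst hxy
      simp [removeDC_f, hx]
    · simp [hxy, removeDC_f, hx]

theorem removeDC_F_cons_comma (ys : List String) :
    removeDC_F ("," :: ys) = "," :: removeDC_F (ys.dropWhile (· = ",")) := by
  induction ys with
  | nil => simp [removeDC_F, removeDC_runs, removeDC_f]
  | cons y ys ih =>
    by_cases hy : y = ","
    · subst hy
      obtain ⟨g, rest, hr⟩ := removeDC_runs_head "," ys
      have h1 : removeDC_F ("," :: "," :: ys) = removeDC_F ("," :: ys) := by
        unfold removeDC_F
        rw [removeDC_runs_cons "," ("," :: ys), hr]
        simp [removeDC_f]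
      rw [h1, ih]
      simp [List.dropWhile]
    · obtain ⟨g, rest, hr⟩ := removeDC_runs_head y ys
      have h1 : removeDC_F ("," :: y :: ys) = "," :: removeDC_F (y :: ys) := by
        unfold removeDC_F
        rw [removeDC_runs_cons "," (y :: ys), hr]
        simp [Ne.symm hy, removeDC_f]
      rw [h1]
      simp [List.dropWhile, hy]

-- collapse depends on `last` only through `last = ","`
theorem removeDC_collapse_congr (xs : List String) :
    ∀ (l l' : String), (l = "," ↔ l' = ",") → removeDC_collapse xs l = removeDC_collapse xs l' := by
  induction xs with
  | nil => intro l l' _; rfl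
  | cons x xs ih =>
    intro l l' h
    by_cases hx : x = ","
    · by_cases hl : l = ","
      · simp [removeDC_collapse, hx, hl, h.mp hl]
      · have hl' : ¬ l' = "," := fun hh => hl (h.mpr hh)
        simp [removeDC_collapse, hx, hl, hl']
    · simp [removeDC_collapse, hx]

theorem removeDC_main (xs : List String) :
    removeDC_collapse xs "" = removeDC_F xs ∧
    removeDC_collapse xs "," = removeDC_F (xs.dropWhile (· = ",")) := by
  induction xs with
  | nil => simp [removeDC_collapse, removeDC_F, removeDC_runs]
  | cons x xs ih =>
    by_cases hx : x = ","
    · subst hx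
      constructor
      · have h1 : removeDC_collapse ("," :: xs) "" = "," :: removeDC_collapse xs "," := by
          simp [removeDC_collapse]
        rw [h1, ih.2, removeDC_F_cons_comma]
      · have h1 : removeDC_collapse ("," :: xs) "," = removeDC_collapse xs "," := by
          simp [removeDC_collapse]
        rw [h1, ih.2]
        simp [List.dropWhile]
    · have hcol : ∀ l, removeDC_collapse (x :: xs) l = x :: removeDC_collapse xs x := by
        intro l
        simp [removeDC_collapse, hx]
      have hxs : removeDC_collapse xs x = removeDC_collapse xs "" :=
        removeDC_collapse_congr xs x "" (by simp [hx])
      constructor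
      · rw [hcol, hxs, ih.1, removeDC_F_cons_ne x xs hx]
      · rw [hcol, hxs, ih.1]
        have hd : (x :: xs).dropWhile (· = ",") = x :: xs := by
          simp [List.dropWhile, hx]
        rw [hd, removeDC_F_cons_ne x xs hx]

-- ===== VERDICT (by name: the statement is the Claim_ definition above) =====
theorem remove_double_commas_py_spec : Claim_equal_remove_double_commas_py := by
  intro items _
  unfold Spec_remove_double_commas_py remove_double_commas_py remove_double_commas_py_alt
  rw [removeDC_A_loop_eq, removeDC_foldl_eq]
  simpa using (removeDC_main items).1
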